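-- pv_equiv track=rewrite | github.com/limmerja/Resilient-Supply-Chains | tools/tools.py | extract_disruption_duration
-- ===== SOURCE A (Python) =====
-- def extract_info_dict(info_list, category):
--     # Extract the demands and inventory levels from the info_list
--     if category in ['demand', 'step', 'disruption']:
--         return [info[category] for info in info_list]
--     else:
--         warehouse = [info[category][0] for info in info_list]
--         distributor = [info[category][1] for info in info_list]
--         retailer = [info[category][2] for info in info_list]
--         return [warehouse, distributor, retailer]
--
-- def extract_disruption_duration(info):
--     disruption_info = extract_info_dict(info, 'disruption')
--     disruptions = []
--     current = False
--     start = -99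
--
--     for index, disruption in enumerate(disruption_info):
--         if (not current) and disruption:
--             current = True
--             start = index
--         elif current and (not disruption):
--             disruptions.append((start, index))
--             current = False
--             start = -99
--
--     if start != -99:
--         disruptions.append((start, len(disruption_info)))
--
--     return disruptions
-- ===== SOURCE B (Python) =====
-- def extract_info_dict(info_list, category):
--     # Extract the demands and inventory levels from the info_list
--     if category in ['demand', 'step', 'disruption']:
--         return [info[category] for info in info_list]
--     else:
--         warehouse = [info[category][0] for info in info_list]
--         distributor = [info[category][1] for info in info_list]
--         retailer = [info[category][2] for info in info_list]
--         return [warehouse, distributor, retailer]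
--
-- def extract_disruption_duration(info):
--     # Two-pointer run scan: find each maximal run of truthy flags directly,
--     # appending (run start, run end) without any state machine or sentinel.
--     bits = extract_info_dict(info, 'disruption')
--     n = len(bits)
--     disruptions = []
--     i = 0
--     while i < n:
--         if bits[i]:
--             j = i + 1
--             while j < n and bits[j]:
--                 j += 1
--             disruptions.append((i, j))
--             i = j
--         else:
--             i += 1
--     return disruptions
-- ===== Notes on version B (the rewrite author's own statement) =====
-- stated objective: alternative
-- what changed: Replaced A's single-pass state machine (current flag plus a -99 start sentinel and a post-loop flush) by a two-pointer scan that locates each maximal run of truthy flags directly and appends (start, end) with no sentinel or flush step.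
import Mathlib
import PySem

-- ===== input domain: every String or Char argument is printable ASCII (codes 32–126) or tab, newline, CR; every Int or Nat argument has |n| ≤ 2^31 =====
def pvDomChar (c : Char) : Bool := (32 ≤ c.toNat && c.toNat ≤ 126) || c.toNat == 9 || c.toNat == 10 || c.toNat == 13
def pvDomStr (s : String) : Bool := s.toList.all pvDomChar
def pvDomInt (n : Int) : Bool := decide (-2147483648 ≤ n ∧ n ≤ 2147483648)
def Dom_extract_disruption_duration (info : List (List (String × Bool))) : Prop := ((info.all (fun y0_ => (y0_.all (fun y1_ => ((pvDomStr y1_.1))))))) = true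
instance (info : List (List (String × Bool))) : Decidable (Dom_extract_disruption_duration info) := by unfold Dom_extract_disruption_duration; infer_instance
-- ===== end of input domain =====

-- B replaces A's state machine (current flag + -99 sentinel + post-loop flush) by a
-- two-pointer run scan; equal return value on all inputs where every dict has the
-- 'disruption' key (elsewhere both Pythons raise KeyError).

-- ===== PORT A =====
-- extract_info_dict(info, 'disruption'): [info['disruption'] for info in info_list];
-- the getD default false is never used under Pre_ (key present); Python raises KeyError there.
def pvExtractInfo (info : List (List (String × Bool))) : List Bool :=
  info.map (fun d => PySem.Dict.getD (PySem.Dict.mk d) "disruption" false)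

-- the loop body of A, state = (disruptions, current, start)
def pvAStep (s : List (Int × Int) × Bool × Int) (p : Int × Bool) : List (Int × Int) × Bool × Int :=
  if !s.2.1 && p.2 then (s.1, true, p.1)
  else if s.2.1 && !p.2 then (s.1 ++ [(s.2.2, p.1)], false, -99)
  else s

def extract_disruption_duration (info : List (List (String × Bool))) : List (Int × Int) :=
  let di := pvExtractInfo info
  let st := (PySem.List.enumerate di).foldl pvAStep ([], false, -99)
  if st.2.2 ≠ -99 then st.1 ++ [(st.2.2, (di.length : Int))] else st.1

-- ===== PORT B =====
-- length of the inner while loop's run of trues (j - (i+1) in Source B)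
def pvRun (bs : List Bool) : Nat := (bs.takeWhile (fun b => b)).length

-- the outer while loop of Source B, recursion on the unread suffix, i = current index
def pvScan : List Bool → Int → List (Int × Int)
  | [], _ => []
  | b :: rest, i =>
    if b then
      (i, i + 1 + pvRun rest) :: pvScan (rest.drop (pvRun rest)) (i + 1 + pvRun rest)
    else pvScan rest (i + 1)
termination_by bs => bs.length
decreasing_by
  · simp [List.length_drop]
  · simp

def extract_disruption_duration_alt (info : List (List (String × Bool))) : List (Int × Int) :=
  pvScan (pvExtractInfo info) 0

-- ===== PRECONDITION & SPEC =====
-- Pre_ excludes exactly the inputs where some dict lacks the 'disruption' key: there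
-- Python A (and Python B alike) raises KeyError and returns nothing.
def Pre_extract_disruption_duration (info : List (List (String × Bool))) : Prop :=
  ∀ d ∈ info, PySem.Dict.contains (PySem.Dict.mk d) "disruption" = true

instance (info : List (List (String × Bool))) : Decidable (Pre_extract_disruption_duration info) := by
  unfold Pre_extract_disruption_duration; infer_instance

def pvWitness_extract_disruption_duration : (List (List (String × Bool))) :=
  [[("disruption", true)], [("disruption", false)]]

def Spec_extract_disruption_duration (info : List (List (String × Bool))) (out : List (Int × Int)) : Prop := out = extract_disruption_duration_alt info
instance (info : List (List (String × Bool))) (out : List (Int × Int)) : Decidable (Spec_extract_disruption_duration info out) := by unfold Spec_extract_disruption_duration; infer_instance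

-- ===== CLAIM (what is proved, stated in full; the proofs are below) =====
def Claim_equal_extract_disruption_duration : Prop := ∀ (info : List (List (String × Bool))), Dom_extract_disruption_duration info → Pre_extract_disruption_duration info → Spec_extract_disruption_duration info (extract_disruption_duration info)

-- ===== LEMMAS AND PROOFS =====

-- A's post-loop flush, as a function of the final state and len(disruption_info)
def pvFinish (st : List (Int × Int) × Bool × Int) (n : Int) : List (Int × Int) :=
  if st.2.2 ≠ -99 then st.1 ++ [(st.2.2, n)] else st.1

lemma pvScan_drop (bs : List Bool) (i : Int) :
    pvScan (bs.drop (pvRun bs)) i = pvScan (bs.drop (pvRun bs + 1)) (i + 1) := by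
  induction bs generalizing i with
  | nil => simp [pvScan]
  | cons b rest ih =>
    by_cases hb : b = true
    · subst hb
      have h : pvRun (true :: rest) = pvRun rest + 1 := by simp [pvRun]
      rw [h, List.drop_succ_cons, List.drop_succ_cons]
      exact ih i
    · simp at hb; subst hb
      have h : pvRun (false :: rest) = 0 := by simp [pvRun]
      rw [h]
      simp [pvScan]

-- joint invariant for A's fold: started fresh (current=false) it computes B's run scan;
-- started mid-run (current=true, start=s ≥ 0) it closes the run at the next false.
lemma pvMain : ∀ (n : Nat) (bits : List Bool), bits.length ≤ n →
    (∀ (ds : List (Int × Int)) (off : Int), 0 ≤ off →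
      pvFinish ((PySem.List.enumerate bits off).foldl pvAStep (ds, false, -99)) (off + bits.length)
        = ds ++ pvScan bits off) ∧
    (∀ (ds : List (Int × Int)) (off s : Int), 0 ≤ off → 0 ≤ s →
      pvFinish ((PySem.List.enumerate bits off).foldl pvAStep (ds, true, s)) (off + bits.length)
        = ds ++ (s, off + (pvRun bits : Int)) :: pvScan (bits.drop (pvRun bits + 1)) (off + (pvRun bits : Int) + 1)) := by
  intro n
  induction n with
  | zero =>
    intro bits hlen
    have hb : bits = [] := List.length_eq_zero_iff.mp (Nat.le_zero.mp hlen)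
    subst hb
    constructor
    · intro ds off _; simp [PySem.List.enumerate, pvFinish, pvScan]
    · intro ds off s hoff hs
      simp [PySem.List.enumerate, pvFinish, pvRun, pvScan]
      omega
  | succ n ih =>
    intro bits hlen
    cases bits with
    | nil =>
      constructor
      · intro ds off _; simp [PySem.List.enumerate, pvFinish, pvScan]
      · intro ds off s hoff hs
        simp [PySem.List.enumerate, pvFinish, pvRun, pvScan]
        omega
    | cons b rest =>
      have hr : rest.length ≤ n := by simpa using Nat.succ_le_succ_iff.mp hlen
      obtain ⟨ih1, ih2⟩ := ih rest hr
      constructor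
      · intro ds off hoff
        rw [PySem.List.enumerate_cons]
        have e : off + (((b :: rest).length : Nat) : Int) = (off + 1) + rest.length := by
          push_cast [List.length_cons]; ring
        rw [e]
        by_cases hb : b = true
        · subst hb
          have hstep : pvAStep (ds, false, -99) (off, true) = (ds, true, off) := by
            simp [pvAStep]
          rw [List.foldl_cons, hstep, ih2 ds (off + 1) off (by omega) hoff]
          have h1 : pvScan (true :: rest) off
              = (off, off + 1 + (pvRun rest : Int)) :: pvScan (rest.drop (pvRun rest)) (off + 1 + (pvRun rest : Int)) := by
            simp [pvScan]
          rw [h1, pvScan_drop]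
        · simp at hb; subst hb
          have hstep : pvAStep (ds, false, -99) (off, false) = (ds, false, -99) := by
            simp [pvAStep]
          rw [List.foldl_cons, hstep, ih1 ds (off + 1) (by omega)]
          have h1 : pvScan (false :: rest) off = pvScan rest (off + 1) := by simp [pvScan]
          rw [h1]
      · intro ds off s hoff hs
        rw [PySem.List.enumerate_cons]
        have e : off + (((b :: rest).length : Nat) : Int) = (off + 1) + rest.length := by
          push_cast [List.length_cons]; ring
        rw [e]
        by_cases hb : b = true
        · subst hb
          have hstep : pvAStep (ds, true, s) (off, true) = (ds, true, s) := by
            simp [pvAStep]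
          rw [List.foldl_cons, hstep, ih2 ds (off + 1) s (by omega) hs]
          have h2 : pvRun (true :: rest) = pvRun rest + 1 := by simp [pvRun]
          rw [h2, List.drop_succ_cons]
          push_cast
          ring_nf
        · simp at hb; subst hb
          have hstep : pvAStep (ds, true, s) (off, false) = (ds ++ [(s, off)], false, -99) := by
            simp [pvAStep]
          rw [List.foldl_cons, hstep, ih1 (ds ++ [(s, off)]) (off + 1) (by omega)]
          have h2 : pvRun (false :: rest) = 0 := by simp [pvRun]
          rw [h2]
          simp

-- ===== VERDICT (by name: the statement is the Claim_ definition above) =====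
theorem extract_disruption_duration_spec : Claim_equal_extract_disruption_duration := by
  intro info _ _
  unfold Spec_extract_disruption_duration extract_disruption_duration extract_disruption_duration_alt
  have h := (pvMain (pvExtractInfo info).length (pvExtractInfo info) le_rfl).1 [] 0 le_rfl
  simp only [zero_add] at h
  simpa [pvFinish] using h
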